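-- pv_equiv track=rewrite | github.com/atgae9a4/Programmers | 프로그래머스/0/120921. 문자열 밀기/문자열 밀기.py | solution
-- ===== SOURCE A (Python) =====
-- def solution(A, B):
--     answer = 0
--     if A == B:
--         return answer
--     for _ in range(len(A)):
--         A = A[-1] + A[:-1]
--         answer += 1
--         if A == B:
--             return answer
--
--     return -1
-- ===== SOURCE B (Python) =====
-- def solution(A, B):
--     if len(A) != len(B):
--         return -1
--     return (B + B).find(A)
-- ===== Notes on version B (the rewrite author's own statement) =====
-- stated objective: faster
-- what changed: Replaces the rotate-and-compare loop with a single substring search: a right shift by k makes A equal B iff A occurs in B+B at offset k, so the answer is (B+B).find(A) after a length check.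
import Mathlib
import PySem

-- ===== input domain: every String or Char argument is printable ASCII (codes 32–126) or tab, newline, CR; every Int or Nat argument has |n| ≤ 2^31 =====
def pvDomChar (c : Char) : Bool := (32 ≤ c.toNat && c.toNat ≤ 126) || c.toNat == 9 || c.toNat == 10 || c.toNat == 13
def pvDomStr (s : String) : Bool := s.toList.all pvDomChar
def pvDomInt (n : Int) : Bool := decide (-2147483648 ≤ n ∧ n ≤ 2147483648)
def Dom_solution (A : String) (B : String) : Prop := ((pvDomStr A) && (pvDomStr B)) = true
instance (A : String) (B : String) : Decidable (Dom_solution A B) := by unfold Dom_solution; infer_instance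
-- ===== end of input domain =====

-- B replaces A's rotate-and-compare loop by one substring search in B+B after a length check.

-- ===== PORT A =====
-- the loop: 'A = A[-1] + A[:-1]; answer += 1; if A == B: return answer', run `fuel` times
def solGo (B : List Char) : Nat → List Char → Int → Int
  | 0, _, _ => -1
  | f + 1, A, ans =>
    match PySem.List.pyGet? A (-1) with
    | none => -1   -- A[-1] on the empty string: unreachable (the loop runs len(A) > 0 times only when A is nonempty, and rotating keeps the length)
    | some c =>
      let A' := c :: PySem.List.slice A none (some (-1))
      if A' = B then ans + 1 else solGo B f A' (ans + 1)

def solution (A : String) (B : String) : Int :=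
  let a := A.toList
  let b := B.toList
  if a = b then 0 else solGo b a.length a 0

-- ===== PORT B =====
def solution_alt (A : String) (B : String) : Int :=
  let a := A.toList
  let b := B.toList
  if a.length ≠ b.length then -1 else PySem.Chars.find (b ++ b) a

-- ===== PRECONDITION & SPEC =====
def Spec_solution (A : String) (B : String) (out : Int) : Prop := out = solution_alt A B
instance (A : String) (B : String) (out : Int) : Decidable (Spec_solution A B out) := by unfold Spec_solution; infer_instance

-- ===== CLAIM (what is proved, stated in full; the proofs are below) =====
def Claim_equal_solution : Prop := ∀ (A : String) (B : String), Dom_solution A B → Spec_solution A B (solution A B)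

-- ===== LEMMAS AND PROOFS =====

def firstHit (a b : List Char) : Nat → Option Nat
  | 0 => none
  | f + 1 => if a.rotate f = b then some 1 else (firstHit a b f).map (· + 1)

theorem firstHit_none_iff (a b : List Char) (f : Nat) :
    firstHit a b f = none ↔ ∀ j < f, a.rotate j ≠ b := by
  induction f with
  | zero => simp [firstHit]
  | succ f ih =>
    simp only [firstHit]
    split_ifs with hr
    · simp only [false_iff]
      intro hall
      exact absurd hr (hall f (by omega))

    · rw [Option.map_eq_none_iff, ih]
      constructor
      · intro hall j hj
        rcases Nat.lt_or_ge j f with h | h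
        · exact hall j h
        · have : j = f := by omega
          subst this; exact hr
      · intro hall j hj; exact hall j (by omega)

theorem firstHit_some (a b : List Char) (f : Nat) : ∀ k, firstHit a b f = some k →
    1 ≤ k ∧ k ≤ f ∧ a.rotate (f - k) = b ∧ ∀ k', 1 ≤ k' → k' < k → a.rotate (f - k') ≠ b := by
  induction f with
  | zero => simp [firstHit]
  | succ f ih =>
    intro k hk
    simp only [firstHit] at hk
    split_ifs at hk with hr
    · cases hk
      refine ⟨le_refl _, by omega, by simpa using hr, by omega⟩
    · rcases Option.map_eq_some_iff.mp hk with ⟨k0, h0, rfl⟩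
      obtain ⟨h1, h2, h3, h4⟩ := ih k0 h0
      refine ⟨by omega, by omega, by simpa [Nat.succ_sub h2] using h3, ?_⟩
      intro k' hk1 hk2
      rcases Nat.eq_or_lt_of_le hk1 with h | h
      · simpa [← h] using hr
      · have : f + 1 - k' = f - (k' - 1) := by omega
        rw [this]
        exact h4 (k' - 1) (by omega) (by omega)

theorem pyGet_neg_one (l : List Char) (h : l ≠ []) : PySem.List.pyGet? l (-1) = some (l.getLast h) := by
  have hl : 1 ≤ l.length := List.length_pos_iff.mpr h
  simp [PySem.List.pyGet?, PySem.List.pyIdx?, hl]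
  rw [List.getElem?_eq_getElem (by omega)]
  simp [List.getLast_eq_getElem]

theorem rshift_eq (l : List Char) (h : l ≠ []) :
    l.getLast h :: PySem.List.slice l none (some (-1)) = l.rotate (l.length - 1) := by
  rw [PySem.List.slice_to_neg_one, List.rotate_eq_drop_append_take (by omega),
      List.drop_length_sub_one h, List.dropLast_eq_take]
  rfl

theorem solGo_eq (b a : List Char) (hne : a ≠ []) :
    ∀ f, f ≤ a.length → ∀ ans,
      solGo b f (a.rotate f) ans =
        match firstHit a b f with
        | some k => ans + k
        | none => -1 := by
  intro f
  induction f with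
  | zero => intro _ ans; simp [solGo, firstHit]
  | succ f ih =>
    intro hf ans
    have hne' : a.rotate (f+1) ≠ [] := by
      simpa using hne
    rw [solGo, pyGet_neg_one _ hne']
    simp only
    rw [rshift_eq _ hne']
    have hlen : (a.rotate (f+1)).length = a.length := List.length_rotate a _
    rw [hlen, List.rotate_rotate]
    have harith : f + 1 + (a.length - 1) = a.length + f := by omega
    rw [harith]
    have hroll : a.rotate (a.length + f) = a.rotate f := by
      rw [← List.rotate_rotate, List.rotate_length]
    rw [hroll]
    simp only [firstHit]
    split_ifs with hr
    · rfl
    · rw [ih (by omega) (ans + 1)]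
      cases hfh : firstHit a b f with
      | none => simp
      | some k => simp; ring

theorem prefix_drop_iff (a b : List Char) (j : Nat) (hab : a.length = b.length)
    (hj : j ≤ b.length) : a <+: (b ++ b).drop j ↔ a = b.rotate j := by
  rw [List.prefix_iff_eq_take, List.rotate_eq_drop_append_take hj]
  have hdrop : (b ++ b).drop j = b.drop j ++ b := by
    rw [List.drop_append_of_le_length hj]
  have htake : (b.drop j ++ b).take b.length = b.drop j ++ b.take j := by
    rw [List.take_append, List.length_drop]
    congr 1
    · exact List.take_of_length_le (by simp)
    · congr 1; omega
  rw [hdrop, hab, htake]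

theorem rot_inv (a b : List Char) (k : Nat) (hab : a.length = b.length) (hk : k ≤ b.length) :
    a.rotate (b.length - k) = b ↔ a = b.rotate k := by
  constructor
  · intro h
    rw [← h, List.rotate_rotate]
    have : b.length - k + k = a.length := by omega
    rw [this, List.rotate_length]
  · intro h
    rw [h, List.rotate_rotate]
    have : k + (b.length - k) = b.length := by omega
    rw [this, List.rotate_length]

theorem find_eq_of (s sub : List Char) (k : Nat) (h : sub <+: s.drop k)
    (hmin : ∀ i < k, ¬ sub <+: s.drop i) : PySem.Chars.find s sub = (k : Int) := by
  have hin : PySem.Chars.isIn sub s = true :=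
    (PySem.Chars.exists_prefix_drop_iff_isIn sub s).mp ⟨k, h⟩
  have h0 : 0 ≤ PySem.Chars.find s sub :=
    (PySem.Chars.find_nonneg_iff s sub).mpr ((PySem.Chars.isIn_iff_infix sub s).mp hin)
  obtain ⟨hp, hm⟩ := PySem.Chars.find_spec h0
  rcases lt_trichotomy (PySem.Chars.find s sub).toNat k with hlt | heq | hgt
  · exact absurd hp (hmin _ hlt)
  · omega
  · exact absurd h (hm k hgt)

-- ===== VERDICT (by name: the statement is the Claim_ definition above) =====
theorem solution_spec : Claim_equal_solution := by
  intro A B _dom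
  unfold Spec_solution
  show solution A B = solution_alt A B
  unfold solution solution_alt
  set a := A.toList with ha
  set b := B.toList with hb
  simp only
  by_cases heq : a = b
  · rw [if_pos heq, heq, if_neg (by simp)]
    rw [find_eq_of (b ++ b) b 0 (by simp) (by omega)]
    simp
  · rw [if_neg heq]
    by_cases hlen : a.length = b.length
    · -- equal length, a ≠ b
      have hne : a ≠ [] := by
        intro h
        apply heq
        rw [h] at hlen ⊢
        exact (List.eq_nil_of_length_eq_zero hlen.symm).symm
      have hn : 0 < a.length := List.length_pos_iff.mpr hne
      rw [if_neg (by omega)]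
      have := solGo_eq b a hne a.length (le_refl _) 0
      rw [List.rotate_length] at this
      rw [this]
      cases hfh : firstHit a b a.length with
      | some k =>
        obtain ⟨h1, h2, h3, h4⟩ := firstHit_some a b a.length k hfh
        have hak : a = b.rotate k := by
          rw [← rot_inv a b k hlen (by omega)]
          rw [← hlen]; exact h3
        have hpre : a <+: (b ++ b).drop k := by
          rw [prefix_drop_iff a b k hlen (by omega)]; exact hak
        have hmin : ∀ i < k, ¬ a <+: (b ++ b).drop i := by
          intro i hi hp
          rw [prefix_drop_iff a b i hlen (by omega)] at hp
          rcases Nat.eq_zero_or_pos i with h0 | h0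
          · subst h0; simp at hp; exact heq hp
          · have : a.rotate (a.length - i) = b := by
              rw [hlen]
              exact (rot_inv a b i hlen (by omega)).mpr hp
            exact h4 i h0 hi this
        rw [find_eq_of (b ++ b) a k hpre hmin]
        simp
      | none =>
        have hall := (firstHit_none_iff a b a.length).mp hfh
        rw [(PySem.Chars.find_eq_neg_one_iff (b ++ b) a).mpr]
        intro hinf
        have hin : PySem.Chars.isIn a (b ++ b) = true :=
          (PySem.Chars.isIn_iff_infix a (b ++ b)).mpr hinf
        obtain ⟨j, hj⟩ := (PySem.Chars.exists_prefix_drop_iff_isIn a (b ++ b)).mpr hin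
        have hjle : j ≤ b.length := by
          by_contra hgt
          have hl := hj.length_le
          simp [List.length_drop] at hl
          omega
        rw [prefix_drop_iff a b j hlen hjle] at hj
        rcases Nat.eq_zero_or_pos j with h0 | h0
        · subst h0; simp at hj; exact heq hj
        · have hrot : a.rotate (a.length - j) = b := by
            rw [hlen]; exact (rot_inv a b j hlen hjle).mpr hj
          exact hall (a.length - j) (by omega) hrot
    · -- different lengths
      rw [if_pos hlen]
      rcases Nat.eq_zero_or_pos a.length with h0 | h0
      · have ha0 : a = [] := List.eq_nil_of_length_eq_zero h0
        rw [ha0]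
        rfl
      · have hne : a ≠ [] := by
          intro h; rw [h] at h0; simp at h0
        have hgo := solGo_eq b a hne a.length (le_refl _) 0
        rw [List.rotate_length] at hgo
        rw [hgo]
        have hnone : firstHit a b a.length = none :=
          (firstHit_none_iff a b a.length).mpr (fun j hj h => hlen (by rw [← h]; simp))
        rw [hnone]
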